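-- pv_equiv track=rewrite | github.com/philly88r/serp-analyzer | generate_seo_blog.py | generate_factors
-- ===== SOURCE A (Python) =====
-- def generate_factors(query):
--     """Generate factors to consider based on the query"""
--     words = query.lower().split()
--
--     # Default factors
--     factors = [
--         "Materials",
--         "Durability",
--         "Design",
--         "Functionality"
--     ]
--
--     # Customize based on query
--     if any(word in words for word in ['phone', 'smartphone', 'mobile']):
--         factors = [
--             "Materials",
--             "Durability",
--             "Adjustability",
--             "Compatibility"
--         ]
--     elif any(word in words for word in ['laptop', 'computer']):
--         factors = [
--             "Materials",
--             "Weight Capacity",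
--             "Cooling Features",
--             "Portability"
--         ]
--
--     return factors
-- ===== SOURCE B (Python) =====
-- # B: single pass over the query's words keeping a running max priority (dict keyword->priority),
-- # then selecting the factor list for the best priority; replaces repeated keyword-membership scans.
-- _PRIORITY = {'phone': 2, 'smartphone': 2, 'mobile': 2, 'laptop': 1, 'computer': 1}
-- _PHONE = ["Materials", "Durability", "Adjustability", "Compatibility"]
-- _LAPTOP = ["Materials", "Weight Capacity", "Cooling Features", "Portability"]
-- _DEFAULT = ["Materials", "Durability", "Design", "Functionality"]
--
-- def generate_factors(query):
--     best = 0
--     for w in query.lower().split():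
--         p = _PRIORITY.get(w, 0)
--         if p > best:
--             best = p
--     return _PHONE if best == 2 else _LAPTOP if best == 1 else _DEFAULT
-- ===== Notes on version B (the rewrite author's own statement) =====
-- stated objective: alternative
-- what changed: Instead of testing each keyword group for membership in the word list (if/elif chain), B scans the query's words once, keeping a running maximum priority looked up in a keyword->priority dict, and selects the factor list for the final best priority.
import Mathlib
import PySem

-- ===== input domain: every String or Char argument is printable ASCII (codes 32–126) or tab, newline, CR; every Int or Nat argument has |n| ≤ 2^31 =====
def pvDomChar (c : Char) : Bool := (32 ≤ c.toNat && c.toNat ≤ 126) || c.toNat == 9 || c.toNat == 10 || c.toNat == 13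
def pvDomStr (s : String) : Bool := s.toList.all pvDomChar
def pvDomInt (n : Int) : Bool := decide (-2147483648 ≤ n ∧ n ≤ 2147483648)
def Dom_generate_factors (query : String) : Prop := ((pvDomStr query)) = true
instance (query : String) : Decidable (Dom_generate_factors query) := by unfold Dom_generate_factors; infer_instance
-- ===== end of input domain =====

-- B replaces the keyword-group membership chain by a single pass over the words keeping a running
-- maximum priority (dict keyword -> priority); alternative decomposition, same cost class.

-- ===== PORT A =====
-- Port of A: lowercase+split, then the if/elif chain with inline factor lists.
def generate_factors (query : String) : List String :=
  let words := PySem.Str.split₀ (PySem.Str.lower query)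
  let factors := ["Materials", "Durability", "Design", "Functionality"]
  if (["phone", "smartphone", "mobile"].any (fun word => words.contains word)) then
    ["Materials", "Durability", "Adjustability", "Compatibility"]
  else if (["laptop", "computer"].any (fun word => words.contains word)) then
    ["Materials", "Weight Capacity", "Cooling Features", "Portability"]
  else factors

-- ===== PORT B =====
-- Port of B: one fold over the words computing the maximum keyword priority, then a select.
def pvPriority : PySem.Dict String Int :=
  PySem.Dict.ofList [("phone", 2), ("smartphone", 2), ("mobile", 2), ("laptop", 1), ("computer", 1)]

def pvPhone : List String := ["Materials", "Durability", "Adjustability", "Compatibility"]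
def pvLaptop : List String := ["Materials", "Weight Capacity", "Cooling Features", "Portability"]
def pvDefault : List String := ["Materials", "Durability", "Design", "Functionality"]

def pvStep (best : Int) (w : String) : Int :=
  let p := PySem.Dict.getD pvPriority w 0
  if p > best then p else best

def generate_factors_alt (query : String) : List String :=
  let best := (PySem.Str.split₀ (PySem.Str.lower query)).foldl pvStep (0 : Int)
  if best == 2 then pvPhone else if best == 1 then pvLaptop else pvDefault

-- ===== PRECONDITION & SPEC =====
def Spec_generate_factors (query : String) (out : List String) : Prop := out = generate_factors_alt query
instance (query : String) (out : List String) : Decidable (Spec_generate_factors query out) := by unfold Spec_generate_factors; infer_instance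

-- ===== CLAIM (what is proved, stated in full; the proofs are below) =====
def Claim_equal_generate_factors : Prop := ∀ (query : String), Dom_generate_factors query → Spec_generate_factors query (generate_factors query)

-- ===== LEMMAS AND PROOFS =====

-- pvP w written out as a case split on the keyword
set_option maxRecDepth 4000 in
theorem pvP_eq (w : String) :
    PySem.Dict.getD pvPriority w 0 =
      if w = "phone" ∨ w = "smartphone" ∨ w = "mobile" then 2
      else if w = "laptop" ∨ w = "computer" then 1 else 0 := by
  have hmk : pvPriority = PySem.Dict.mk
      [("phone", 2), ("smartphone", 2), ("mobile", 2), ("laptop", 1), ("computer", 1)] := by decide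
  rw [hmk, PySem.Dict.getD_eq_get?_getD]
  simp only [PySem.Dict.get?_mk_cons, beq_iff_eq]
  split_ifs <;> simp_all [PySem.Dict.get?, @eq_comm String w]

theorem pvP_nonneg (w : String) : 0 ≤ PySem.Dict.getD pvPriority w 0 := by
  rw [pvP_eq]; split_ifs <;> omega

theorem pvP_le_two (w : String) : PySem.Dict.getD pvPriority w 0 ≤ 2 := by
  rw [pvP_eq]; split_ifs <;> omega

theorem foldl_pvStep_shift (ws : List String) : ∀ b : Int, 0 ≤ b →
    ws.foldl pvStep b = max b (ws.foldl pvStep 0) := by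
  induction ws with
  | nil => intro b hb; simp only [List.foldl_nil]; exact (max_eq_left hb).symm
  | cons w ws ih =>
    intro b hb
    have hp := pvP_nonneg w
    have hstep : ∀ c : Int, pvStep c w = max c (PySem.Dict.getD pvPriority w 0) := by
      intro c; simp only [pvStep]; split_ifs <;> omega
    simp only [List.foldl_cons, hstep]
    rw [max_eq_right hp, ih _ (le_max_of_le_left hb), ih _ hp]
    omega

theorem foldl_pvStep_cons (w : String) (ws : List String) :
    (w :: ws).foldl pvStep 0 = max (PySem.Dict.getD pvPriority w 0) (ws.foldl pvStep 0) := by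
  simp only [List.foldl_cons]
  have hstep : pvStep 0 w = max 0 (PySem.Dict.getD pvPriority w 0) := by
    simp only [pvStep]; split_ifs <;> omega
  rw [hstep, max_eq_right (pvP_nonneg w), foldl_pvStep_shift ws _ (pvP_nonneg w)]

theorem foldl_pvStep_nonneg (ws : List String) : 0 ≤ ws.foldl pvStep 0 := by
  induction ws with
  | nil => simp
  | cons w ws ih => rw [foldl_pvStep_cons]; exact le_max_of_le_right ih

theorem foldl_pvStep_ub (ws : List String) (k : Int) (hk : 0 ≤ k)
    (h : ∀ w ∈ ws, PySem.Dict.getD pvPriority w 0 ≤ k) : ws.foldl pvStep 0 ≤ k := by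
  induction ws with
  | nil => simpa using hk
  | cons w ws ih =>
    rw [foldl_pvStep_cons]
    exact max_le (h w (List.mem_cons_self ..)) (ih fun v hv => h v (List.mem_cons_of_mem _ hv))

theorem foldl_pvStep_mem_le (ws : List String) (w : String) (hw : w ∈ ws) :
    PySem.Dict.getD pvPriority w 0 ≤ ws.foldl pvStep 0 := by
  induction ws with
  | nil => cases hw
  | cons v ws ih =>
    rw [foldl_pvStep_cons]
    rcases List.mem_cons.mp hw with h | h
    · exact h ▸ le_max_left _ _
    · exact le_max_of_le_right (ih h)

-- ===== VERDICT (by name: the statement is the Claim_ definition above) =====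
theorem generate_factors_spec : Claim_equal_generate_factors := by
  intro query _
  unfold Spec_generate_factors generate_factors generate_factors_alt
  set ws := PySem.Str.split₀ (PySem.Str.lower query) with hws
  by_cases h2 : ∃ w ∈ ws, w = "phone" ∨ w = "smartphone" ∨ w = "mobile"
  · -- phone case: both return pvPhone
    obtain ⟨w, hwmem, hwkey⟩ := h2
    have hmem2 : "phone" ∈ ws ∨ "smartphone" ∈ ws ∨ "mobile" ∈ ws := by
      rcases hwkey with h | h | h
      · exact Or.inl (h ▸ hwmem)
      · exact Or.inr (Or.inl (h ▸ hwmem))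
      · exact Or.inr (Or.inr (h ▸ hwmem))
    have hpw : PySem.Dict.getD pvPriority w 0 = 2 := by rw [pvP_eq]; simp [hwkey]
    have hF : ws.foldl pvStep 0 = 2 :=
      le_antisymm (foldl_pvStep_ub ws 2 (by omega) fun v _ => pvP_le_two v)
        (hpw ▸ foldl_pvStep_mem_le ws w hwmem)
    simp [hmem2, hF, pvPhone]
  · have hn2 : ¬("phone" ∈ ws ∨ "smartphone" ∈ ws ∨ "mobile" ∈ ws) := by
      rintro (h | h | h)
      · exact h2 ⟨"phone", h, Or.inl rfl⟩
      · exact h2 ⟨"smartphone", h, Or.inr (Or.inl rfl)⟩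
      · exact h2 ⟨"mobile", h, Or.inr (Or.inr rfl)⟩
    have hub1 : ∀ v ∈ ws, PySem.Dict.getD pvPriority v 0 ≤ 1 := by
      intro v hv
      rw [pvP_eq]
      split_ifs with hk
      · exact absurd ⟨v, hv, hk⟩ h2
      · omega
      · omega
    by_cases h1 : ∃ w ∈ ws, w = "laptop" ∨ w = "computer"
    · -- laptop case
      obtain ⟨w, hwmem, hwkey⟩ := h1
      have hmem1 : "laptop" ∈ ws ∨ "computer" ∈ ws := by
        rcases hwkey with h | h
        · exact Or.inl (h ▸ hwmem)
        · exact Or.inr (h ▸ hwmem)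
      have hnot2 : ¬(w = "phone" ∨ w = "smartphone" ∨ w = "mobile") := fun hc => h2 ⟨w, hwmem, hc⟩
      have hpw : PySem.Dict.getD pvPriority w 0 = 1 := by rw [pvP_eq]; simp [hwkey, hnot2]
      have hF : ws.foldl pvStep 0 = 1 :=
        le_antisymm (foldl_pvStep_ub ws 1 (by omega) hub1)
          (hpw ▸ foldl_pvStep_mem_le ws w hwmem)
      simp [hn2, hmem1, hF, pvLaptop]
    · -- default case
      have hn1 : ¬("laptop" ∈ ws ∨ "computer" ∈ ws) := by
        rintro (h | h)
        · exact h1 ⟨"laptop", h, Or.inl rfl⟩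
        · exact h1 ⟨"computer", h, Or.inr rfl⟩
      have hub0 : ∀ v ∈ ws, PySem.Dict.getD pvPriority v 0 ≤ 0 := by
        intro v hv
        rw [pvP_eq]
        split_ifs with hk hl
        · exact absurd ⟨v, hv, hk⟩ h2
        · exact absurd ⟨v, hv, hl⟩ h1
        · omega
      have hF : ws.foldl pvStep 0 = 0 :=
        le_antisymm (foldl_pvStep_ub ws 0 le_rfl hub0) (foldl_pvStep_nonneg ws)
      simp [hn2, hn1, hF, pvDefault]
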